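-- pv_equiv track=rewrite | github.com/psaniuk/consistent-hashing | app/consistent_hashing.py | map_virtual_nodes_to_ranges
-- ===== SOURCE A (Python) =====
-- def map_virtual_nodes_to_ranges(
--     number_of_virtual_nodes: int, range_size: int
-- ) -> list[tuple[int, int], int]:
--     if number_of_virtual_nodes <= 0:
--         raise ValueError("Number of virtual nodes should be greater than 0")
--
--     if range_size <= 0:
--         raise ValueError("Range size should be greater than 0")
--
--     return [
--         (i * range_size, (i + 1) * range_size) for i in range(number_of_virtual_nodes)
--     ]
-- ===== SOURCE B (Python) =====
-- def map_virtual_nodes_to_ranges(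
--     number_of_virtual_nodes: int, range_size: int
-- ) -> list[tuple[int, int], int]:
--     if number_of_virtual_nodes <= 0:
--         raise ValueError("Number of virtual nodes should be greater than 0")
--
--     if range_size <= 0:
--         raise ValueError("Range size should be greater than 0")
--
--     def build(count, offset):
--         # divide and conquer: split the count in half, shift the right half
--         if count == 1:
--             return [(offset, offset + range_size)]
--         half = count // 2
--         return build(half, offset) + build(count - half, offset + half * range_size)
--
--     return build(number_of_virtual_nodes, 0)
-- ===== Notes on version B (the rewrite author's own statement) =====
-- stated objective: alternative
-- what changed: Replaces A's single left-to-right comprehension over range(n) with a recursive divide-and-conquer that splits the node count in half, builds each half independently and concatenates, shifting the right half by half*range_size.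
import Mathlib
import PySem

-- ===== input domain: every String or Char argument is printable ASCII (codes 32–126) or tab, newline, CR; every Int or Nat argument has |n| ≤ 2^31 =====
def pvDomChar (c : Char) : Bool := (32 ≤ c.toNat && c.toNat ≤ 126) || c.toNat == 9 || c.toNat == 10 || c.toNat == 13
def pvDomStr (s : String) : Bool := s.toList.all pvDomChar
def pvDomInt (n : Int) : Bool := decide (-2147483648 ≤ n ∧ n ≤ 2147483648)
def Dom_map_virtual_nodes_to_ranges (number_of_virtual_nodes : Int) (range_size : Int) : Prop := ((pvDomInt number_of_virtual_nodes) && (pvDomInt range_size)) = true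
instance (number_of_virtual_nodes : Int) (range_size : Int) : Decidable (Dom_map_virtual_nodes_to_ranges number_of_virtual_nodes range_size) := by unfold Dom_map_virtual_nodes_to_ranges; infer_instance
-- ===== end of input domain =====

-- B replaces A's left-to-right comprehension with a recursive divide-and-conquer split of the node count (alternative decomposition; equivalence about return values only; A raises on non-positive inputs, excluded by Pre_).


-- ===== PORT A =====
-- Port of A: guards raise ValueError (excluded by Pre_); comprehension over range(n).
def map_virtual_nodes_to_ranges (number_of_virtual_nodes : Int) (range_size : Int) : List (Int × Int) :=
  if number_of_virtual_nodes ≤ 0 then []  -- Python: raise ValueError (outside Pre_)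
  else if range_size ≤ 0 then []          -- Python: raise ValueError (outside Pre_)
  else (PySem.List.pyRange 0 number_of_virtual_nodes 1).map
    (fun i => (i * range_size, (i + 1) * range_size))

-- ===== PORT B =====
-- Port of B's `build`: count carried as a Nat (B only ever calls it with count ≥ 1).
def pvBuild (range_size : Int) : Nat → Int → List (Int × Int)
  | 0, _ => []                                    -- unreachable in B (count ≥ 1)
  | 1, offset => [(offset, offset + range_size)]
  | k + 2, offset =>
      let half := (k + 2) / 2
      pvBuild range_size half offset ++
        pvBuild range_size (k + 2 - half) (offset + (half : Int) * range_size)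
  decreasing_by all_goals omega

def map_virtual_nodes_to_ranges_alt (number_of_virtual_nodes : Int) (range_size : Int) : List (Int × Int) :=
  if number_of_virtual_nodes ≤ 0 then []  -- Python: raise ValueError (outside Pre_)
  else if range_size ≤ 0 then []          -- Python: raise ValueError (outside Pre_)
  else pvBuild range_size number_of_virtual_nodes.toNat 0

-- ===== PRECONDITION & SPEC =====
-- Pre_: A raises ValueError when number_of_virtual_nodes <= 0 or range_size <= 0.
def Pre_map_virtual_nodes_to_ranges (number_of_virtual_nodes : Int) (range_size : Int) : Prop :=
  0 < number_of_virtual_nodes ∧ 0 < range_size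
instance (number_of_virtual_nodes : Int) (range_size : Int) : Decidable (Pre_map_virtual_nodes_to_ranges number_of_virtual_nodes range_size) := by unfold Pre_map_virtual_nodes_to_ranges; infer_instance
def pvWitness_map_virtual_nodes_to_ranges : Int × Int := (3, 5)
def Spec_map_virtual_nodes_to_ranges (number_of_virtual_nodes : Int) (range_size : Int) (out : List (Int × Int)) : Prop := out = map_virtual_nodes_to_ranges_alt number_of_virtual_nodes range_size
instance (number_of_virtual_nodes : Int) (range_size : Int) (out : List (Int × Int)) : Decidable (Spec_map_virtual_nodes_to_ranges number_of_virtual_nodes range_size out) := by unfold Spec_map_virtual_nodes_to_ranges; infer_instance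

-- ===== CLAIM (what is proved, stated in full; the proofs are below) =====
def Claim_equal_map_virtual_nodes_to_ranges : Prop := ∀ (number_of_virtual_nodes : Int) (range_size : Int), Dom_map_virtual_nodes_to_ranges number_of_virtual_nodes range_size → Pre_map_virtual_nodes_to_ranges number_of_virtual_nodes range_size → Spec_map_virtual_nodes_to_ranges number_of_virtual_nodes range_size (map_virtual_nodes_to_ranges number_of_virtual_nodes range_size)

-- ===== LEMMAS AND PROOFS =====
-- The divide-and-conquer build at `offset` produces exactly the map k ↦ (offset + k*r, offset + (k+1)*r).
theorem pvBuild_eq_map (r : Int) : ∀ (n : Nat) (offset : Int),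
    pvBuild r n offset
      = (List.range n).map (fun k : Nat => (offset + (k : Int) * r, offset + ((k : Int) + 1) * r)) := by
  intro n
  induction n using Nat.strong_induction_on with
  | _ n ih =>
    match n with
    | 0 => intro offset; simp [pvBuild]
    | 1 =>
      intro offset
      simp [pvBuild, List.range_succ]
    | k + 2 =>
      intro offset
      rw [pvBuild]
      have hsplit : k + 2 = (k + 2) / 2 + (k + 2 - (k + 2) / 2) := by omega
      rw [ih ((k + 2) / 2) (by omega), ih (k + 2 - (k + 2) / 2) (by omega)]
      conv_rhs => rw [hsplit, List.range_add]
      rw [List.map_append, List.map_map]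
      congr 1
      apply List.map_congr_left
      intro j _
      simp only [Function.comp]
      rw [Prod.mk.injEq]
      push_cast
      constructor <;> ring

-- ===== VERDICT (by name: the statement is the Claim_ definition above) =====
theorem map_virtual_nodes_to_ranges_spec : Claim_equal_map_virtual_nodes_to_ranges := by
  intro n r _ hpre
  obtain ⟨hn, hr⟩ := hpre
  unfold Spec_map_virtual_nodes_to_ranges map_virtual_nodes_to_ranges map_virtual_nodes_to_ranges_alt
  rw [if_neg (by omega), if_neg (by omega), if_neg (by omega), if_neg (by omega)]
  rw [pvBuild_eq_map, PySem.List.pyRange_one, List.map_map]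
  simp only [Int.sub_zero]
  apply List.map_congr_left
  intro k _
  simp only [Function.comp]
  rw [Prod.mk.injEq]
  constructor <;> ring
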